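-- pv_equiv track=rewrite | github.com/johnxpark/algorithm | programmers/weekly/language.py | solution
-- ===== SOURCE A (Python) =====
-- def solution(table: list, languages: list, preference: list):
--     jobs = []
--     for t in table:
--         tmp = t.split()
--         jobs.append(tmp)
--
--     answer = jobs[0][0]
--     max_score = -1
--     for job in jobs:
--         score = 0
--         for i, lang in enumerate(languages):
--             if lang in job:
--                 score += preference[i] * (6 - job.index(lang))
--         if score == max_score:
--             if answer > job[0]:
--                 answer = job[0]
--         elif score > max_score:
--             max_score = score
--             answer = job[0]
--
--     return answer
-- ===== SOURCE B (Python) =====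
-- def solution(table, languages, preference):
--     # Pass 1: build a (score, name) table, one entry per parsed job, plus the
--     # baseline (-1, first job name); Pass 2: a separate max/min reduction.
--     jobs = [t.split() for t in table]
--     pairs = list(zip(languages, preference))
--     cands = [(-1, jobs[0][0])]
--     for job in jobs:
--         s = sum(p * (6 - job.index(l)) for l, p in pairs if l in job)
--         cands.append((s, job[0]))
--     best = max(s for s, _ in cands)
--     return min(n for s, n in cands if s == best)
-- ===== Notes on version B (the rewrite author's own statement) =====
-- stated objective: alternative
-- what changed: A's single fused scoring+selection loop with (answer, max_score) running state is split into a pass that builds a (score, name) table (with a (-1, first-name) baseline entry) followed by a separate max/min reduction: best = max score, answer = lexicographically smallest name among candidates with that score.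
-- outside the precondition, e.g. on solution(['b x', ''], ['x'], [1]): A returns 'b', B raises IndexError
import Mathlib
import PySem

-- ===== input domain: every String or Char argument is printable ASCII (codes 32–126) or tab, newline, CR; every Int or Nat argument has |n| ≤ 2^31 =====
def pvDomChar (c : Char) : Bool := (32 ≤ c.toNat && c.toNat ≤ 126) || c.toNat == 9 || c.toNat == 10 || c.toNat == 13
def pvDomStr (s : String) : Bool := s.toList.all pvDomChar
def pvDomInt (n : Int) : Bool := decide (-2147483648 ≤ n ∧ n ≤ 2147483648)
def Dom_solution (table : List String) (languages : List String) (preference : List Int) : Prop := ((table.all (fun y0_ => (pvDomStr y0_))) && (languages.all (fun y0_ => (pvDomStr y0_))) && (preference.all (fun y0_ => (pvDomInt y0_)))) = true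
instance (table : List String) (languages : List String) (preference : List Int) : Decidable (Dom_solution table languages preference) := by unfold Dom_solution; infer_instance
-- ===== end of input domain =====

-- B splits A's fused scoring+selection loop into a (score, name) table-building pass
-- (with a (-1, first-name) baseline candidate) followed by a separate max/min reduction (objective: alternative).


-- ===== PORT A =====
def solution (table : List String) (languages : List String) (preference : List Int) : String :=
  let jobs := table.foldl (fun acc t => acc ++ [PySem.Str.split₀ t]) []
  let st := jobs.foldl (fun (st : String × Int) (job : List String) =>
      let score := (PySem.List.enumerate languages 0).foldl
        (fun (s : Int) (p : Int × String) =>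
          if job.contains p.2 then
            s + PySem.List.pyGetD preference p.1 0 * (6 - (((PySem.List.index? job p.2).getD 0 : Nat) : Int))
          else s) 0
      if score = st.2 then (if job.headD "" < st.1 then (job.headD "", st.2) else st)
      else if score > st.2 then (job.headD "", score)
      else st)
    ((jobs.headD []).headD "", -1)
  st.1

-- ===== PORT B =====
def scoreJob (pairs : List (String × Int)) (job : List String) : Int :=
  pairs.foldl (fun (s : Int) (p : String × Int) =>
    if job.contains p.1 then s + p.2 * (6 - (((PySem.List.index? job p.1).getD 0 : Nat) : Int)) else s) 0

def solution_alt (table : List String) (languages : List String) (preference : List Int) : String :=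
  let jobs := table.map (fun t => PySem.Str.split₀ t)
  let pairs := languages.zip preference
  let cands := jobs.foldl (fun acc job => acc ++ [(scoreJob pairs job, job.headD "")])
      [((-1 : Int), (jobs.headD []).headD "")]
  let best := (PySem.List.max? (cands.map (fun c => c.1)) (fun x => x)).getD 0
  (PySem.List.min? ((cands.filter (fun c => c.1 == best)).map (fun c => c.2)) (fun x => x)).getD ""

-- ===== PRECONDITION & SPEC =====
-- Pre_ excludes inputs on which the Python A raises IndexError (empty table; a language with
-- index ≥ len(preference) occurring in some row) and rows whose split() is empty, on which A's
-- raising depends on the running max score (A can return there while B's per-row job[0] raises; see cites).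
def Pre_solution (table : List String) (languages : List String) (preference : List Int) : Prop :=
  table ≠ [] ∧ (∀ t ∈ table, PySem.Str.split₀ t ≠ []) ∧
  (∀ i, i < languages.length → preference.length ≤ i →
    ∀ t ∈ table, languages.getD i "" ∉ PySem.Str.split₀ t)
instance (table : List String) (languages : List String) (preference : List Int) : Decidable (Pre_solution table languages preference) := by unfold Pre_solution; infer_instance

def pvWitness_solution : List String × List String × List Int :=
  (["java backend pizza", "python frontend chicken"], ["python", "java"], [3, 2])

def Spec_solution (table : List String) (languages : List String) (preference : List Int) (out : String) : Prop := out = solution_alt table languages preference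
instance (table : List String) (languages : List String) (preference : List Int) (out : String) : Decidable (Spec_solution table languages preference out) := by unfold Spec_solution; infer_instance

-- ===== CLAIM (what is proved, stated in full; the proofs are below) =====
def Claim_equal_solution : Prop := ∀ (table : List String) (languages : List String) (preference : List Int), Dom_solution table languages preference → Pre_solution table languages preference → Spec_solution table languages preference (solution table languages preference)

-- ===== LEMMAS AND PROOFS =====

-- A's selection step, abstracted over the scored candidate (score, name)
def selA (st : String × Int) (c : Int × String) : String × Int :=
  if c.1 = st.2 then (if c.2 < st.1 then (c.2, st.2) else st)
  else if c.1 > st.2 then (c.2, c.1) else st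

-- running maximum of the scores, seeded with m
def bestOf (m : Int) (l : List (Int × String)) : Int := l.foldl (fun b c => max b c.1) m

-- the names of the candidates achieving score b, in order
def namesAt (b : Int) (cl : List (Int × String)) : List String :=
  (cl.filter (fun c => c.1 == b)).map (fun c => c.2)

theorem le_bestOf (m : Int) (l : List (Int × String)) : m ≤ bestOf m l := by
  induction l generalizing m with
  | nil => simp [bestOf]
  | cons c t ih => exact le_trans (le_max_left m c.1) (ih (max m c.1))

theorem selLoop (l : List (Int × String)) : ∀ (a : String) (m : Int),
    l.foldl selA (a, m) =
      ((match namesAt (bestOf m l) ((m, a) :: l) with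
        | [] => ""
        | x :: t => t.foldl min x), bestOf m l) := by
  induction l with
  | nil => intro a m; simp [bestOf, namesAt]
  | cons c t ih =>
    obtain ⟨c1, c2⟩ := c
    intro a m
    have hb : bestOf m ((c1, c2) :: t) = bestOf (max m c1) t := by simp [bestOf]
    rw [List.foldl_cons]
    rcases lt_trichotomy c1 m with h | h | h
    · -- c1 < m : state unchanged, candidate can never reach the max
      have hsel : selA (a, m) (c1, c2) = (a, m) := by
        have h1 : ¬ (c1 = m) := by omega
        have h2 : ¬ (c1 > m) := by omega
        simp [selA, h1, h2]
      have hbm : max m c1 = m := by omega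
      rw [hsel, ih a m, hb, hbm]
      have hle : m ≤ bestOf m t := le_bestOf _ _
      have hcne : (c1 == bestOf m t) = false := by simp; omega
      congr 1
      simp [namesAt, List.filter, hcne]
    · -- c1 = m : answer becomes the min of the two names
      subst h
      have hsel : selA (a, c1) (c1, c2) = (min a c2, c1) := by
        rcases lt_trichotomy c2 a with h2 | h2 | h2
        · simp [selA, h2, min_eq_right h2.le]
        · simp [selA, h2, min_self]
        · simp [selA, not_lt.mpr h2.le, min_eq_left h2.le]
      have hbm : max c1 c1 = c1 := by omega
      rw [hsel, ih (min a c2) c1, hb, hbm]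
      by_cases hc : c1 = bestOf c1 t
      · congr 1
        simp [namesAt, List.filter, ← hc]
      · have hcne : (c1 == bestOf c1 t) = false := by simp [hc]
        congr 1
        simp [namesAt, List.filter, hcne]
    · -- m < c1 : candidate takes over
      have hsel : selA (a, m) (c1, c2) = (c2, c1) := by
        have h1 : ¬ (c1 = m) := by omega
        simp [selA, h1, h]
      have hbm : max m c1 = c1 := by omega
      rw [hsel, ih c2 c1, hb, hbm]
      have hle : c1 ≤ bestOf c1 t := le_bestOf _ _
      have hmne : (m == bestOf c1 t) = false := by simp; omega
      congr 1
      simp [namesAt, List.filter, hmne]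

theorem score_eq (job : List String) (langs : List String) (pref : List Int) :
    ∀ (k : Nat) (s0 : Int),
    (∀ j (hj : j < langs.length), pref.length ≤ k + j → job.contains langs[j] = false) →
    (PySem.List.enumerate langs (k : Int)).foldl
        (fun (s : Int) (p : Int × String) =>
          if job.contains p.2 then
            s + PySem.List.pyGetD pref p.1 0 * (6 - (((PySem.List.index? job p.2).getD 0 : Nat) : Int))
          else s) s0
      = (langs.zip (pref.drop k)).foldl
        (fun (s : Int) (p : String × Int) =>
          if job.contains p.1 then s + p.2 * (6 - (((PySem.List.index? job p.1).getD 0 : Nat) : Int)) else s) s0 := by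
  induction langs with
  | nil => simp [PySem.List.enumerate_nil]
  | cons x xs ih =>
    intro k s0 hH
    have hcast : ((k:Int) + 1) = ((k+1 : Nat) : Int) := by push_cast; ring
    have hH' : ∀ j (hj : j < xs.length), pref.length ≤ (k+1) + j → job.contains xs[j] = false := by
      intro j hj hle
      have := hH (j+1) (by simp; omega) (by omega)
      simpa using this
    by_cases hk : k < pref.length
    · have hdrop : pref.drop k = pref[k] :: pref.drop (k+1) := List.drop_eq_getElem_cons hk
      rw [PySem.List.enumerate_cons, hdrop]
      simp only [List.zip_cons_cons, List.foldl_cons]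
      rw [hcast, ih (k+1) _ hH']
      congr 1
      rw [PySem.List.pyGetD_natCast]
      simp [List.getD, hk]
    · have hx : job.contains x = false := by
        have := hH 0 (by simp) (by omega)
        simpa using this
      have hdrop : pref.drop k = [] := List.drop_eq_nil_of_le (by omega)
      rw [PySem.List.enumerate_cons, hdrop]
      simp only [List.zip_nil_right, List.foldl_cons, List.foldl_nil, hx, if_false,
        Bool.false_eq_true]
      rw [hcast, ih (k+1) s0 hH']
      have hdrop' : pref.drop (k+1) = [] := List.drop_eq_nil_of_le (by omega)
      simp [hdrop']

theorem main (table : List String) (languages : List String) (preference : List Int)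
    (hpre : ∀ i, i < languages.length → preference.length ≤ i →
      ∀ t ∈ table, languages.getD i "" ∉ PySem.Str.split₀ t) :
    solution table languages preference = solution_alt table languages preference := by
  unfold solution solution_alt
  simp only [PySem.List.foldl_append_singleton_eq_map, List.nil_append]
  set jobsL := table.map (fun t => PySem.Str.split₀ t) with hjobs
  set pairs := languages.zip preference with hpairs
  set a0 := (jobsL.headD []).headD "" with ha0
  -- A's loop body is selA over scored candidates (score_eq applies to each job of the table)
  have hfold : jobsL.foldl (fun (st : String × Int) (job : List String) =>
      let score := (PySem.List.enumerate languages 0).foldl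
        (fun (s : Int) (p : Int × String) =>
          if job.contains p.2 then
            s + PySem.List.pyGetD preference p.1 0 * (6 - (((PySem.List.index? job p.2).getD 0 : Nat) : Int))
          else s) 0
      if score = st.2 then (if job.headD "" < st.1 then (job.headD "", st.2) else st)
      else if score > st.2 then (job.headD "", score)
      else st) (a0, -1)
      = jobsL.foldl (fun st job => selA st (scoreJob pairs job, job.headD "")) (a0, -1) := by
    apply PySem.List.foldl_congr_mem
    intro st job hjob
    have hH : ∀ j (hj : j < languages.length), preference.length ≤ 0 + j →
        job.contains languages[j] = false := by
      intro j hj hle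
      obtain ⟨t, ht, rfl⟩ := List.mem_map.mp hjob
      have := hpre j hj (by omega) t ht
      rw [List.getD_eq_getElem languages "" hj] at this
      simpa using this
    have hs := score_eq job languages preference 0 0 hH
    have h0 : ((0 : Nat) : Int) = (0 : Int) := by norm_num
    rw [h0] at hs
    simp only [List.drop_zero] at hs
    simp only [hs, selA, scoreJob, hpairs]
  rw [hfold, ← List.foldl_map]
  set l := jobsL.map (fun job => (scoreJob pairs job, job.headD "")) with hl
  -- B's best is bestOf (-1) l
  have hmapfst : ([((-1 : Int), a0)] ++ l).map (fun c => c.1) = (-1 : Int) :: l.map (fun c => c.1) := by simp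
  rw [hmapfst, PySem.List.max?_id_cons]
  have hbest : (l.map (fun c => (c.1 : Int))).foldl max (-1) = bestOf (-1) l := by
    rw [List.foldl_map]; rfl
  simp only [Option.getD_some, hbest]
  rw [selLoop l a0 (-1)]
  have hnames : (([((-1 : Int), a0)] ++ l).filter (fun c => c.1 == bestOf (-1) l)).map (fun c => c.2)
      = namesAt (bestOf (-1) l) (((-1 : Int), a0) :: l) := by
    simp [namesAt]
  rw [hnames]
  cases hns : namesAt (bestOf (-1) l) (((-1 : Int), a0) :: l) with
  | nil => simp [PySem.List.min?]
  | cons x t => rw [PySem.List.min?_id_cons]; simp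

-- ===== VERDICT (by name: the statement is the Claim_ definition above) =====
theorem solution_spec : Claim_equal_solution := by
  intro table languages preference _ hpre
  unfold Spec_solution
  exact main table languages preference hpre.2.2
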